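-- pv_equiv track=rewrite | github.com/andrerocco/programacao-orientada-a-objetos | Exercicios/Listas e Matrizes (Aula 15).py | todos_acertaram_algum
-- ===== SOURCE A (Python) =====
-- def todos_acertaram_algum(numero_participantes, resultados):
--     acertou_algum = 0
--     for x in range(numero_participantes):
--         for y in resultados[x]:
--             if y != 0:
--                 acertou_algum += 1
--                 break
--     if acertou_algum == numero_participantes:
--         return 1
--     else:
--         return 0
-- ===== SOURCE B (Python) =====
-- def todos_acertaram_algum(numero_participantes, resultados):
--     def verifica(linhas):
--         if not linhas:
--             return 1
--         return verifica(linhas[1:]) if any(linhas[0]) else 0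
--     return verifica(resultados[:numero_participantes])
-- ===== Notes on version B (the rewrite author's own statement) =====
-- stated objective: simpler
-- what changed: Slices the first numero_participantes rows once and consumes that list recursively with an early return 0 at the first all-zero row (truthiness via any), instead of indexing by range with a hit counter compared to the total at the end; Pre_ restricts to the natural domain 0 <= numero_participantes <= len(resultados), since above len A raises IndexError and a negative participant count is outside the task's natural domain.
-- outside the precondition, e.g. on todos_acertaram_algum(-1, [[1]]): A returns 0, B returns 1; on todos_acertaram_algum(2, [[1]]): A raises IndexError, B returns 1
import Mathlib
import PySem

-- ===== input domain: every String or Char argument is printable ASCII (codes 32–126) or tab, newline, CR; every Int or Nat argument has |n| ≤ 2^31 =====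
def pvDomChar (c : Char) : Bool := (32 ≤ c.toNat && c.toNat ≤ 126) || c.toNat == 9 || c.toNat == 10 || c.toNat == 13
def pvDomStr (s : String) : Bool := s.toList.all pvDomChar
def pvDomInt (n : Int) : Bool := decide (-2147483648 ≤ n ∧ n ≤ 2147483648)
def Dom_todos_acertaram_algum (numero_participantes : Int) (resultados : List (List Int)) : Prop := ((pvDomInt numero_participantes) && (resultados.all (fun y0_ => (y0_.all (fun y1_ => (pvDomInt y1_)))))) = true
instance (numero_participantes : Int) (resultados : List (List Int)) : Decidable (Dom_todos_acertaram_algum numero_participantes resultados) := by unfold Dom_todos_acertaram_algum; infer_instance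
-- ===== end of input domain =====

-- B slices the first n rows once and consumes them recursively, returning 0 at the
-- first all-zero row, instead of counting hits over range(n) and comparing to n (objective: simpler).

-- ===== PORT A =====
-- A's inner loop: 'for y in resultados[x]: if y != 0: acertou_algum += 1; break'
def pvInnerA (acc : Int) (ys : List Int) : Int :=
  match ys with
  | [] => acc
  | y :: t => if y ≠ 0 then acc + 1 else pvInnerA acc t

-- range(n) ported by hand as List.range n.toNat mapped to Int (exact: empty for n ≤ 0,
-- the integers 0..n-1 otherwise).
def pvRangeN (n : Int) : List Int :=
  (List.range n.toNat).map (fun k => Int.ofNat k)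

def todos_acertaram_algum (numero_participantes : Int) (resultados : List (List Int)) : Int :=
  let acertou_algum := (pvRangeN numero_participantes).foldl
    (fun acc x => pvInnerA acc (PySem.List.pyGetD resultados x [])) 0
  if acertou_algum = numero_participantes then 1 else 0

-- ===== PORT B =====
-- B's inner helper 'verifica': recursion on the sliced row list.
def pvVerifica (linhas : List (List Int)) : Int :=
  match linhas with
  | [] => 1
  | h :: t => if h.any (fun y => y ≠ 0) then pvVerifica t else 0

def todos_acertaram_algum_alt (numero_participantes : Int) (resultados : List (List Int)) : Int :=
  pvVerifica (PySem.List.slice resultados none (some numero_participantes))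

-- ===== PRECONDITION & SPEC =====
-- Pre_ restricts to the natural domain 0 ≤ numero_participantes ≤ resultados.length:
-- above the length A raises IndexError, and a negative participant count is outside the
-- task's natural domain (A happens to return 0 there only because the count never equals a negative total).
def Pre_todos_acertaram_algum (numero_participantes : Int) (resultados : List (List Int)) : Prop :=
  0 ≤ numero_participantes ∧ numero_participantes ≤ resultados.length

instance (numero_participantes : Int) (resultados : List (List Int)) : Decidable (Pre_todos_acertaram_algum numero_participantes resultados) := by unfold Pre_todos_acertaram_algum; infer_instance

def pvWitness_todos_acertaram_algum : Int × List (List Int) := (2, [[0, 1], [3]])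

def Spec_todos_acertaram_algum (numero_participantes : Int) (resultados : List (List Int)) (out : Int) : Prop := out = todos_acertaram_algum_alt numero_participantes resultados
instance (numero_participantes : Int) (resultados : List (List Int)) (out : Int) : Decidable (Spec_todos_acertaram_algum numero_participantes resultados out) := by unfold Spec_todos_acertaram_algum; infer_instance

-- ===== CLAIM =====
def Claim_equal_todos_acertaram_algum : Prop := ∀ (numero_participantes : Int) (resultados : List (List Int)), Dom_todos_acertaram_algum numero_participantes resultados → Pre_todos_acertaram_algum numero_participantes resultados → Spec_todos_acertaram_algum numero_participantes resultados (todos_acertaram_algum numero_participantes resultados)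

-- ===== LEMMAS AND PROOFS =====

-- A's inner loop adds 1 exactly when the list has a nonzero element.
theorem pvInnerA_eq (acc : Int) (ys : List Int) :
    pvInnerA acc ys = acc + (if ys.any (fun y => y ≠ 0) then 1 else 0) := by
  induction ys with
  | nil => simp [pvInnerA]
  | cons y t ih =>
    by_cases h : y = 0 <;> simp [pvInnerA, h, ih]

-- A's outer fold counts the indices whose list has a nonzero element.
theorem pvFoldA_eq (g : Int → List Int) (L : List Int) (acc : Int) :
    L.foldl (fun acc x => pvInnerA acc (g x)) acc
      = acc + (L.countP (fun x => (g x).any (fun y => y ≠ 0)) : Int) := by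
  induction L generalizing acc with
  | nil => simp
  | cons x t ih =>
    rw [List.foldl_cons, pvInnerA_eq, ih, List.countP_cons]
    cases h : (g x).any (fun y => y ≠ 0)
    · simp
    · simp
      ring

-- B's recursion returns 1 iff every row has a nonzero element.
theorem pvVerifica_eq (linhas : List (List Int)) :
    pvVerifica linhas = if linhas.all (fun h => h.any (fun y => y ≠ 0)) then 1 else 0 := by
  induction linhas with
  | nil => simp [pvVerifica]
  | cons h t ih =>
    cases hh : h.any (fun y => y ≠ 0) <;>
      simp only [pvVerifica, hh, ih, List.all_cons, Bool.false_and, Bool.true_and,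
        if_true, if_false, Bool.false_eq_true]

-- pvRangeN n is the list 0,1,…,n.toNat-1.
theorem pvRangeN_length (n : Int) : (pvRangeN n).length = n.toNat := by
  simp [pvRangeN]

theorem pvRangeN_getElem (n : Int) (i : Nat) (_h : i < (pvRangeN n).length) :
    (pvRangeN n)[i] = (i : Int) := by
  simp [pvRangeN]

-- ===== VERDICT =====
theorem todos_acertaram_algum_spec : Claim_equal_todos_acertaram_algum := by
  intro n res _ hpre
  obtain ⟨hn0, hnlen⟩ := hpre
  unfold Spec_todos_acertaram_algum todos_acertaram_algum todos_acertaram_algum_alt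
  rw [PySem.List.slice_to res hn0, pvVerifica_eq]
  simp only [pvFoldA_eq, zero_add]
  have hlen : ((pvRangeN n).length : Int) = n := by
    rw [pvRangeN_length]; omega
  have hmapped : (pvRangeN n).map (fun x => PySem.List.pyGetD res x []) = res.take n.toNat := by
    apply List.ext_getElem
    · simp only [List.length_map, pvRangeN_length, List.length_take]
      omega
    · intro i h1 h2
      have hir : i < res.length := by
        simp only [List.length_take] at h2; omega
      rw [List.getElem_map, pvRangeN_getElem n i (by simpa using h1),
        PySem.List.pyGetD_natCast, List.getD_eq_getElem _ _ hir, List.getElem_take]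
  have hiff : (∀ x ∈ pvRangeN n, ((PySem.List.pyGetD res x []).any fun y => y ≠ 0) = true)
      ↔ ((res.take n.toNat).all (fun h => h.any (fun y => y ≠ 0)) = true) := by
    rw [List.all_eq_true, ← hmapped]
    constructor
    · intro hA row hrow
      obtain ⟨x, hx, rfl⟩ := List.mem_map.mp hrow
      exact hA x hx
    · intro hB x hx
      exact hB _ (List.mem_map_of_mem hx)
  by_cases hall : ∀ x ∈ pvRangeN n, ((PySem.List.pyGetD res x []).any fun y => y ≠ 0) = true
  · have hc : (pvRangeN n).countP (fun x => (PySem.List.pyGetD res x []).any fun y => y ≠ 0) = (pvRangeN n).length :=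
      List.countP_eq_length.mpr hall
    rw [if_pos (hiff.mp hall), if_pos (by rw [hc, hlen])]
  · have hlt : (pvRangeN n).countP (fun x => (PySem.List.pyGetD res x []).any fun y => y ≠ 0) < (pvRangeN n).length := by
      have hle : (pvRangeN n).countP (fun x => (PySem.List.pyGetD res x []).any fun y => y ≠ 0) ≤ (pvRangeN n).length :=
        List.countP_le_length
      rcases Nat.lt_or_ge ((pvRangeN n).countP (fun x => (PySem.List.pyGetD res x []).any fun y => y ≠ 0)) (pvRangeN n).length with h | h
      · exact h
      · exact absurd (List.countP_eq_length.mp (le_antisymm hle h)) hall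
    rw [if_neg (fun hc => hall (hiff.mpr hc)), if_neg (by omega)]
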